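-- pv_equiv track=rewrite | github.com/srikrishnakaashyap/Coding_Practice | CommonStrings.py | commonStrings2
-- ===== SOURCE A (Python) =====
-- def commonStrings2(categories, k):
--
--     categories = list(categories)
--     n = len(categories)
--     prefix = [0 for i in range(n)]
--     s = set()
--     s.add(categories[0])
--     prefix[0] = s.copy()
--
--     for i in range(1, n):
--         s.add(categories[i])
--         prefix[i] = s.copy()
--
--     s = set()
--
--     answer = 0
--     for i in range(n-2, -1, -1):
--
--         s.add(categories[i+1])
--
--         s1 = prefix[i]
--         cnt = 0
--         for j in s1:
--             if j in s:
--                 cnt += 1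
--         if cnt > k:
--             answer += 1
--
--     return answer
-- ===== SOURCE B (Python) =====
-- def commonStrings2(categories, k):
--     categories = list(categories)
--     n = len(categories)
--     right = {}
--     for x in categories:
--         right[x] = right.get(x, 0) + 1
--     left = {}
--     common = 0
--     answer = 0
--     for i in range(n - 1):
--         x = categories[i]
--         lx = left.get(x, 0)
--         rx = right.get(x, 0)
--         left[x] = lx + 1
--         right[x] = rx - 1
--         if lx == 0 and rx >= 2:
--             common += 1
--         elif lx > 0 and rx == 1:
--             common -= 1
--         if common > k:
--             answer += 1
--     return answer
-- ===== Notes on version B (the rewrite author's own statement) =====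
-- stated objective: faster
-- what changed: Replaced A's quadratic scheme (store a prefix-set per index, then for each split re-scan the whole prefix set against a growing suffix set) by one forward sliding pass that keeps left/right frequency dictionaries and incrementally updates a single counter of values present on both sides.
import Mathlib
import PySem

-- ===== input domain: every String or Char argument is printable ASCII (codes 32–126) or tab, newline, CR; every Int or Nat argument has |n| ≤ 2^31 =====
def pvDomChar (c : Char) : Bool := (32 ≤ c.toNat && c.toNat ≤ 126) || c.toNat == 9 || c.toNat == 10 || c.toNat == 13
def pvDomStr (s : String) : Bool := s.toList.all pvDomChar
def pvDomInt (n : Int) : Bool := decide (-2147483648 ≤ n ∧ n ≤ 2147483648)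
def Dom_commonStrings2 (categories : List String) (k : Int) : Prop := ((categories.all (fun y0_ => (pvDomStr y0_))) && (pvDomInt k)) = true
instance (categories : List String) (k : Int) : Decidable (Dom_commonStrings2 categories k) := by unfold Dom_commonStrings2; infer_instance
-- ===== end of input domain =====

-- B replaces A's quadratic prefix-set/suffix-set rescan by one forward pass keeping left/right
-- frequency dicts and an incrementally updated both-sides-distinct counter (objective: faster).

-- ===== PORT A =====
-- body of A's first loop (builds the prefix array of sets)
def pvABuildStep (categories : List String) (st : List (PySem.Set String) × PySem.Set String) (i : Int) :
    List (PySem.Set String) × PySem.Set String :=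
  let s := PySem.Set.add st.2 (PySem.List.pyGetD categories i "")
  (PySem.List.pySetD st.1 i s, s)

-- body of A's second (countdown) loop
def pvAStep (categories : List String) (k : Int) (pfx : List (PySem.Set String))
    (st : PySem.Set String × Int) (i : Int) : PySem.Set String × Int :=
  let s := PySem.Set.add st.1 (PySem.List.pyGetD categories (i + 1) "")
  let s1 := PySem.List.pyGetD pfx i PySem.Set.empty
  let cnt : Int := s1.foldl (fun cnt j => if PySem.Set.contains s j then cnt + 1 else cnt) 0
  (s, if cnt > k then st.2 + 1 else st.2)

def commonStrings2 (categories : List String) (k : Int) : Int :=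
  let n : Int := (categories.length : Int)
  let pfx0 : List (PySem.Set String) := List.replicate categories.length PySem.Set.empty
  let s0 : PySem.Set String := PySem.Set.add PySem.Set.empty (PySem.List.pyGetD categories 0 "")
  let st1 := (PySem.List.pyRange 1 n 1).foldl (pvABuildStep categories) (PySem.List.pySetD pfx0 0 s0, s0)
  let st2 := (PySem.List.pyRange (n - 2) (-1) (-1)).foldl (pvAStep categories k st1.1) (PySem.Set.empty, 0)
  st2.2

-- ===== PORT B =====
-- body of B's single forward loop; state = (left, right, common, answer)
def pvBStep (categories : List String) (k : Int)
    (st : PySem.Dict String Int × PySem.Dict String Int × Int × Int) (i : Int) :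
    PySem.Dict String Int × PySem.Dict String Int × Int × Int :=
  let x := PySem.List.pyGetD categories i ""
  let lx := st.1.getD x 0
  let rx := st.2.1.getD x 0
  let left := st.1.insert x (lx + 1)
  let right := st.2.1.insert x (rx - 1)
  let common := if lx = 0 ∧ 2 ≤ rx then st.2.2.1 + 1
                else if 0 < lx ∧ rx = 1 then st.2.2.1 - 1
                else st.2.2.1
  (left, right, common, if common > k then st.2.2.2 + 1 else st.2.2.2)

def commonStrings2_alt (categories : List String) (k : Int) : Int :=
  let n : Int := (categories.length : Int)
  let right : PySem.Dict String Int :=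
    categories.foldl (fun d x => d.insert x (d.getD x 0 + 1)) PySem.Dict.empty
  let st := (PySem.List.pyRange 0 (n - 1) 1).foldl (pvBStep categories k)
    (PySem.Dict.empty, right, 0, 0)
  st.2.2.2

-- ===== PRECONDITION & SPEC =====
-- Pre_ excludes only the empty list, on which the Python A raises IndexError (categories[0]).
def Pre_commonStrings2 (categories : List String) (k : Int) : Prop := categories ≠ []
instance (categories : List String) (k : Int) : Decidable (Pre_commonStrings2 categories k) := by unfold Pre_commonStrings2; infer_instance
def pvWitness_commonStrings2 : List String × Int := (["a", "b", "a"], 0)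

def pvRaiseWitness_commonStrings2 : List String × Int := ([], 0)
def pvRaiseWitnessOut_commonStrings2 : Int := 0

def Spec_commonStrings2 (categories : List String) (k : Int) (out : Int) : Prop := out = commonStrings2_alt categories k
instance (categories : List String) (k : Int) (out : Int) : Decidable (Spec_commonStrings2 categories k out) := by unfold Spec_commonStrings2; infer_instance

-- ===== CLAIM (what is proved, stated in full; the proofs are below) =====
def Claim_equal_commonStrings2 : Prop := ∀ (categories : List String) (k : Int), Dom_commonStrings2 categories k → Pre_commonStrings2 categories k → Spec_commonStrings2 categories k (commonStrings2 categories k)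

-- ===== LEMMAS AND PROOFS =====

-- number of distinct values common to the first i+1 elements and the remaining elements
def pvCntF (cats : List String) (i : Nat) : Nat :=
  (PySem.List.dedup (cats.take (i + 1))).countP (fun x => decide (x ∈ cats.drop (i + 1)))

-- the common answer of both programs
def pvAnsF (cats : List String) (k : Int) : Int :=
  ((List.range (cats.length - 1)).countP (fun i => decide (k < (pvCntF cats i : Int))) : Int)

-- distinct values present on both sides of the split after i elements
def pvCommonF (cats : List String) (i : Nat) : Nat :=
  (PySem.List.dedup cats).countP (fun x => decide (x ∈ cats.take i ∧ x ∈ cats.drop i))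

-- A's prefix array after positions < a have been filled
def pvPfx (cats : List String) (a : Nat) : List (PySem.Set String) :=
  (List.range cats.length).map (fun j => if j < a then PySem.Set.ofList (cats.take (j + 1)) else PySem.Set.empty)

theorem pvNodup_dedup (l : List String) : (PySem.List.dedup l).Nodup := by
  rw [PySem.List.dedup_eq_ofList]; exact PySem.Set.nodup_ofList l

theorem pvCountP_nodup_eq (l₁ l₂ : List String) (p₁ p₂ : String → Bool) (h₁ : l₁.Nodup) (h₂ : l₂.Nodup)
    (h : ∀ x, (x ∈ l₁ ∧ p₁ x = true) ↔ (x ∈ l₂ ∧ p₂ x = true)) :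
    l₁.countP p₁ = l₂.countP p₂ := by
  rw [List.countP_eq_length_filter, List.countP_eq_length_filter]
  refine List.Perm.length_eq ?_
  rw [List.perm_ext_iff_of_nodup (h₁.filter _) (h₂.filter _)]
  intro a; simp only [List.mem_filter]; exact h a

theorem pvCountP_update (l : List String) (hl : l.Nodup) (x : String) (hx : x ∈ l) (p q : String → Bool)
    (h : ∀ y ∈ l, y ≠ x → p y = q y) :
    (l.countP q : Int) = (l.countP p : Int) + (if q x then 1 else 0) - (if p x then 1 else 0) := by
  induction l with
  | nil => cases hx
  | cons y t ih =>
    rw [List.countP_cons, List.countP_cons]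
    rcases List.nodup_cons.mp hl with ⟨hyt, hnd⟩
    by_cases hxy : x = y
    · subst hxy
      have hxt : x ∉ t := hyt
      have heq : t.countP p = t.countP q :=
        List.countP_congr (fun z hz => by rw [h z (List.mem_cons_of_mem _ hz) (fun e => hxt (e ▸ hz))])
      rw [heq]; push_cast; split_ifs <;> omega
    · have hxt : x ∈ t := by
        rcases List.mem_cons.mp hx with h1 | h1
        · exact absurd h1 hxy
        · exact h1
      have hpy : p y = q y := h y (List.mem_cons_self) (fun e => hxy e.symm)
      have hrec := ih hnd hxt (fun z hz hne => h z (List.mem_cons_of_mem _ hz) hne)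
      rw [hpy]; push_cast at hrec ⊢; split_ifs at hrec ⊢ <;> omega

theorem pvCommonF_eq_cntF (cats : List String) (i : Nat) (hi : i + 1 ≤ cats.length) :
    pvCommonF cats (i + 1) = pvCntF cats i := by
  unfold pvCommonF pvCntF
  refine pvCountP_nodup_eq _ _ _ _ (pvNodup_dedup _) (pvNodup_dedup _) (fun x => ?_)
  simp only [PySem.List.dedup_eq_ofList, PySem.Set.mem_ofList, decide_eq_true_eq]
  constructor
  · rintro ⟨-, ht, hd⟩; exact ⟨ht, hd⟩
  · rintro ⟨ht, hd⟩; exact ⟨List.take_subset _ _ ht, ht, hd⟩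

theorem pvPfx_getD (cats : List String) (b a : Nat) (ha : a < cats.length) (hb : a < b) :
    (pvPfx cats b).getD a PySem.Set.empty = PySem.Set.ofList (cats.take (a + 1)) := by
  unfold pvPfx
  rw [List.getD_eq_getElem?_getD]
  simp [ha, hb]

theorem pvPfx_set (cats : List String) (a : Nat) (ha : a < cats.length) :
    (pvPfx cats a).set a (PySem.Set.ofList (cats.take (a + 1))) = pvPfx cats (a + 1) := by
  unfold pvPfx
  apply List.ext_getElem
  · simp
  · intro j hj hj2
    simp only [List.length_set, List.length_map, List.length_range] at hj
    rw [List.getElem_set]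
    by_cases hja : j = a
    · subst hja; simp
    · have hja' : ¬ a = j := fun e => hja e.symm
      have h2 : j < a + 1 ↔ j < a := by omega
      simp [hja', h2]
      exact if_congr (by omega) rfl rfl

theorem pvPfx_zero (cats : List String) (s : PySem.Set String) (h : cats ≠ []) (hs : s = PySem.Set.ofList (cats.take 1)) :
    (List.replicate cats.length PySem.Set.empty).set 0 s = pvPfx cats 1 := by
  subst hs
  unfold pvPfx
  apply List.ext_getElem
  · simp
  · intro j hj hj2
    simp only [List.length_set, List.length_replicate] at hj
    rw [List.getElem_set]
    by_cases hj0 : j = 0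
    · subst hj0; simp
    · have hj0' : ¬ 0 = j := fun e => hj0 e.symm
      have h2 : ¬ (j < 1) := by omega
      simp [hj0', List.getElem_replicate]
      exact fun e => absurd e hj0

theorem pvOfList_snoc (l : List String) (x : String) :
    PySem.Set.ofList (l ++ [x]) = PySem.Set.add (PySem.Set.ofList l) x := by
  simp [PySem.Set.ofList_eq_foldl, List.foldl_append]

theorem pvTake_snoc (cats : List String) (a : Nat) (ha : a < cats.length) :
    cats.take (a + 1) = cats.take a ++ [cats[a]] := by
  rw [List.take_add_one]; simp [List.getElem?_eq_getElem ha]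

theorem pvBuild_loop (cats : List String) (m : Nat) : ∀ (a : Nat), 1 ≤ a → a + m = cats.length →
    (PySem.List.pyRange (a : Int) (cats.length : Int) 1).foldl (pvABuildStep cats)
      (pvPfx cats a, PySem.Set.ofList (cats.take a))
    = (pvPfx cats cats.length, PySem.Set.ofList cats) := by
  induction m with
  | zero =>
    intro a h1 hlen
    rw [PySem.List.pyRange_one_eq_nil (by exact_mod_cast (by omega : cats.length ≤ a))]
    simp only [List.foldl_nil]
    have ha : a = cats.length := by omega
    rw [ha, List.take_length]
  | succ m ih =>
    intro a h1 hlen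
    have ha : a < cats.length := by omega
    rw [PySem.List.pyRange_one_cons (by exact_mod_cast ha)]
    rw [List.foldl_cons]
    have hstep : pvABuildStep cats (pvPfx cats a, PySem.Set.ofList (cats.take a)) (a : Int)
        = (pvPfx cats (a + 1), PySem.Set.ofList (cats.take (a + 1))) := by
      unfold pvABuildStep
      simp only [PySem.List.pyGetD_natCast, PySem.List.pySetD_of_nonneg _ _ (by positivity : (0:Int) ≤ (a:Int))]
      have hg : cats.getD a "" = cats[a] := List.getD_eq_getElem _ _ ha
      rw [hg]
      have ht : (a : Int).toNat = a := by omega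
      rw [ht, show (PySem.Set.ofList (List.take a cats)).add cats[a] = PySem.Set.ofList (cats.take (a+1)) from by
            rw [pvTake_snoc cats a ha, pvOfList_snoc],
          pvPfx_set cats a ha]
    rw [hstep]
    have hcast : (a : Int) + 1 = ((a + 1 : Nat) : Int) := by push_cast; ring
    rw [hcast]
    exact ih (a + 1) (by omega) (by omega)

theorem pvMem_add_drop (cats : List String) (a : Nat) (ha : a + 1 < cats.length)
    (s : PySem.Set String) (hs : ∀ x, x ∈ s ↔ x ∈ cats.drop (a + 2)) (x : String) :
    x ∈ PySem.Set.add s (cats.getD (a + 1) "") ↔ x ∈ cats.drop (a + 1) := by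
  rw [PySem.Set.mem_add, hs, List.drop_eq_getElem_cons ha, List.mem_cons,
      List.getD_eq_getElem _ _ ha]
  tauto

theorem pvAStep_eq (cats : List String) (k : Int) (a : Nat) (ha : a + 2 ≤ cats.length)
    (s : PySem.Set String) (ans : Int) (hs : ∀ x, x ∈ s ↔ x ∈ cats.drop (a + 2)) :
    pvAStep cats k (pvPfx cats cats.length) (s, ans) (a : Int)
    = (PySem.Set.add s (cats.getD (a + 1) ""),
       if k < (pvCntF cats a : Int) then ans + 1 else ans) := by
  unfold pvAStep
  have hc1 : (a : Int) + 1 = ((a + 1 : Nat) : Int) := by push_cast; ring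
  simp only [hc1, PySem.List.pyGetD_natCast]
  rw [pvPfx_getD cats cats.length a (by omega) (by omega)]
  have hcnt : (PySem.Set.ofList (cats.take (a + 1))).foldl
      (fun cnt j => if PySem.Set.contains (PySem.Set.add s (cats.getD (a + 1) "")) j then cnt + 1 else cnt) 0
      = (pvCntF cats a : Int) := by
    rw [PySem.List.foldl_count_if]
    have hco : ∀ j, PySem.Set.contains (PySem.Set.add s (cats.getD (a + 1) "")) j
        = decide (j ∈ cats.drop (a + 1)) := by
      intro j
      rw [PySem.Set.contains_eq_decide]
      simp only [decide_eq_decide]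
      exact pvMem_add_drop cats a (by omega) s hs j
    rw [List.countP_congr (fun j _ => by rw [hco j])]
    unfold pvCntF
    rw [PySem.List.dedup_eq_ofList]
    simp
  rw [hcnt]

theorem pvLoopA (cats : List String) (k : Int) (a : Nat) : a + 2 ≤ cats.length →
    ∀ (s : PySem.Set String) (ans : Int), (∀ x, x ∈ s ↔ x ∈ cats.drop (a + 2)) →
    ((PySem.List.pyRange (a : Int) (-1) (-1)).foldl (pvAStep cats k (pvPfx cats cats.length)) (s, ans)).2
    = ans + ((List.range (a + 1)).countP (fun i => decide (k < (pvCntF cats i : Int))) : Int) := by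
  induction a with
  | zero =>
    intro ha s ans hs
    rw [PySem.List.pyRange_neg_one_cons (by norm_num), List.foldl_cons,
        pvAStep_eq cats k 0 ha s ans hs,
        show ((0:Nat):Int) - 1 = (-1:Int) from by norm_num,
        PySem.List.pyRange_neg_one_eq_nil (by norm_num), List.foldl_nil]
    split_ifs <;> simp_all
  | succ b ih =>
    intro ha s ans hs
    rw [PySem.List.pyRange_neg_one_cons (by exact_mod_cast (by omega : (-1:Int) < ((b+1 : Nat) : Int))), List.foldl_cons,
        pvAStep_eq cats k (b + 1) ha s ans hs]
    have hc : ((b + 1 : Nat) : Int) - 1 = ((b : Nat) : Int) := by push_cast; ring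
    rw [hc]
    have hmem : ∀ x, x ∈ PySem.Set.add s (cats.getD (b + 1 + 1) "") ↔ x ∈ cats.drop (b + 2) :=
      pvMem_add_drop cats (b + 1) (by omega) s hs
    rw [ih (by omega) _ _ hmem]
    rw [List.range_succ (n := b + 1), List.countP_append]
    simp only [List.countP_cons, List.countP_nil]
    push_cast
    split_ifs <;> simp_all <;> omega

theorem pvA_eq (cats : List String) (k : Int) (h : cats ≠ []) :
    commonStrings2 cats k = pvAnsF cats k := by
  simp only [commonStrings2]
  have hlen : 1 ≤ cats.length := List.length_pos_of_ne_nil h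
  have hs0 : PySem.Set.add PySem.Set.empty (PySem.List.pyGetD cats 0 "") = PySem.Set.ofList (cats.take 1) := by
    obtain ⟨c, t, rfl⟩ : ∃ c t, cats = c :: t := by
      cases cats with | nil => exact absurd rfl h | cons c t => exact ⟨c, t, rfl⟩
    simp [PySem.List.pyGetD_ofNat', PySem.Set.ofList_eq_foldl, PySem.Set.add, PySem.Set.contains]
  by_cases h2 : 2 ≤ cats.length
  · have hinit : PySem.List.pySetD (List.replicate cats.length PySem.Set.empty) 0
        (PySem.Set.add PySem.Set.empty (PySem.List.pyGetD cats 0 "")) = pvPfx cats 1 := by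
      rw [PySem.List.pySetD_of_nonneg _ _ (le_refl 0)]
      exact pvPfx_zero cats _ h hs0
    rw [hinit, hs0]
    have hbuild := pvBuild_loop cats (cats.length - 1) 1 (le_refl 1) (by omega)
    rw [show ((1:Nat):Int) = (1:Int) from rfl] at hbuild
    rw [hbuild]
    have hc : (cats.length : Int) - 2 = ((cats.length - 2 : Nat) : Int) := by push_cast; omega
    rw [hc]
    have hloop := pvLoopA cats k (cats.length - 2) (by omega) PySem.Set.empty 0
      (by intro x; rw [show cats.length - 2 + 2 = cats.length from by omega]
          simp [PySem.Set.empty])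
    rw [hloop]
    unfold pvAnsF
    rw [show cats.length - 2 + 1 = cats.length - 1 from by omega]
    ring
  · have h1 : cats.length = 1 := by omega
    rw [h1]
    rw [PySem.List.pyRange_one_eq_nil (by norm_num), List.foldl_nil,
        show ((1:Nat):Int) - 2 = (-1:Int) from by norm_num,
        PySem.List.pyRange_neg_one_eq_nil (by norm_num), List.foldl_nil]
    unfold pvAnsF
    rw [h1]
    simp

theorem pvCommonF_step (cats : List String) (i : Nat) (hi : i < cats.length) :
    (pvCommonF cats (i + 1) : Int) = (pvCommonF cats i : Int)
      + (if 0 < (cats.drop (i + 1)).count cats[i] then 1 else 0)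
      - (if 0 < (cats.take i).count cats[i] then 1 else 0) := by
  have hx : cats[i] ∈ PySem.List.dedup cats := by
    rw [PySem.List.dedup_eq_ofList, PySem.Set.mem_ofList]; exact List.getElem_mem hi
  have hupd := pvCountP_update (PySem.List.dedup cats) (pvNodup_dedup cats) cats[i]
    hx (fun y => decide (y ∈ cats.take i ∧ y ∈ cats.drop i))
    (fun y => decide (y ∈ cats.take (i + 1) ∧ y ∈ cats.drop (i + 1)))
    (by
      intro y _ hyx
      simp only [decide_eq_decide]
      rw [pvTake_snoc cats i hi, List.drop_eq_getElem_cons hi]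
      simp only [List.mem_append, List.mem_cons, List.not_mem_nil, or_false]
      constructor
      · rintro ⟨ht, hd | hd⟩
        · exact absurd hd hyx
        · exact ⟨Or.inl ht, hd⟩
      · rintro ⟨ht | ht, hd⟩
        · exact ⟨ht, Or.inr hd⟩
        · exact absurd ht hyx)
  unfold pvCommonF
  rw [hupd]
  have hq : (decide (cats[i] ∈ cats.take (i + 1) ∧ cats[i] ∈ cats.drop (i + 1)) = true)
      ↔ 0 < (cats.drop (i + 1)).count cats[i] := by
    rw [decide_eq_true_eq, List.count_pos_iff]
    have hmm : cats[i] ∈ cats.take (i + 1) := by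
      rw [pvTake_snoc cats i hi]
      exact List.mem_append_right _ List.mem_cons_self
    tauto
  have hp : (decide (cats[i] ∈ cats.take i ∧ cats[i] ∈ cats.drop i) = true)
      ↔ 0 < (cats.take i).count cats[i] := by
    rw [decide_eq_true_eq, List.count_pos_iff]
    have hmm : cats[i] ∈ cats.drop i := by
      rw [List.drop_eq_getElem_cons hi]
      exact List.mem_cons_self
    tauto
  rw [if_congr hq rfl rfl, if_congr hp rfl rfl]

theorem pvLoopB (cats : List String) (k : Int) (m : Nat) : ∀ (i : Nat), i + m + 1 = cats.length →
    ∀ (L R : PySem.Dict String Int) (c ans : Int),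
    (∀ y, L.getD y 0 = ((cats.take i).count y : Int)) →
    (∀ y, R.getD y 0 = ((cats.drop i).count y : Int)) →
    c = (pvCommonF cats i : Int) →
    ((PySem.List.pyRange (i : Int) ((cats.length : Int) - 1) 1).foldl (pvBStep cats k) (L, R, c, ans)).2.2.2
    = ans + ((List.range m).countP (fun j => decide (k < (pvCntF cats (i + j) : Int))) : Int) := by
  induction m with
  | zero =>
    intro i hlen L R c ans hL hR hc
    rw [PySem.List.pyRange_one_eq_nil (by exact_mod_cast (by omega : (cats.length : Int) - 1 ≤ (i:Int)))]
    simp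
  | succ m ih =>
    intro i hlen L R c ans hL hR hc
    have hi : i < cats.length := by omega
    rw [PySem.List.pyRange_one_cons (by omega), List.foldl_cons]
    have hx : PySem.List.pyGetD cats (i : Int) "" = cats[i] := by
      rw [PySem.List.pyGetD_natCast]; exact List.getD_eq_getElem _ _ hi
    have hstep : pvBStep cats k (L, R, c, ans) (i : Int)
        = (L.insert cats[i] (L.getD cats[i] 0 + 1),
           R.insert cats[i] (R.getD cats[i] 0 - 1),
           (pvCommonF cats (i + 1) : Int),
           if (pvCommonF cats (i + 1) : Int) > k then ans + 1 else ans) := by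
      unfold pvBStep
      simp only [hx]
      have hcc : (if L.getD cats[i] 0 = 0 ∧ 2 ≤ R.getD cats[i] 0 then c + 1
                  else if 0 < L.getD cats[i] 0 ∧ R.getD cats[i] 0 = 1 then c - 1
                  else c) = (pvCommonF cats (i + 1) : Int) := by
        rw [hL, hR, hc]
        have hdropc : (cats.drop i).count cats[i] = (cats.drop (i + 1)).count cats[i] + 1 := by
          rw [List.drop_eq_getElem_cons hi, List.count_cons_self]
        have hupd := pvCommonF_step cats i hi
        rw [hdropc]
        split_ifs at hupd ⊢ <;> push_cast at * <;> omega
      rw [hcc]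
    rw [hstep]
    have hLi : ∀ y, (L.insert cats[i] (L.getD cats[i] 0 + 1)).getD y 0
        = ((cats.take (i + 1)).count y : Int) := by
      intro y
      rw [PySem.Dict.getD_insert, pvTake_snoc cats i hi, List.count_append]
      by_cases hy : y = cats[i]
      · subst hy; rw [if_pos rfl, hL]; simp
      · rw [if_neg hy, hL]
        have hz : [cats[i]].count y = 0 := by
          simp [List.count_singleton]
          exact fun e => hy e.symm
        rw [hz]; simp
    have hRi : ∀ y, (R.insert cats[i] (R.getD cats[i] 0 - 1)).getD y 0
        = ((cats.drop (i + 1)).count y : Int) := by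
      intro y
      rw [PySem.Dict.getD_insert]
      by_cases hy : y = cats[i]
      · subst hy; rw [if_pos rfl, hR, List.drop_eq_getElem_cons hi, List.count_cons_self]
        push_cast; ring
      · rw [if_neg hy, hR, List.drop_eq_getElem_cons hi, List.count_cons_of_ne (fun e => hy e.symm)]
    have hcast : (i : Int) + 1 = ((i + 1 : Nat) : Int) := by push_cast; ring
    rw [hcast, ih (i + 1) (by omega) _ _ _ _ hLi hRi rfl]
    have hrange : (List.range (m + 1)).countP (fun j => decide (k < (pvCntF cats (i + j) : Int)))
        = (if k < (pvCntF cats i : Int) then 1 else 0)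
          + (List.range m).countP (fun j => decide (k < (pvCntF cats (i + 1 + j) : Int))) := by
      rw [List.range_succ_eq_map, List.countP_cons, List.countP_map]
      have hfeq : ((fun j => decide (k < (pvCntF cats (i + j) : Int))) ∘ (fun j => j + 1))
          = fun j => decide (k < (pvCntF cats (i + 1 + j) : Int)) := by
        funext j
        simp only [Function.comp_apply]
        rw [show i + (j + 1) = i + 1 + j from by omega]
      rw [hfeq]
      simp only [Nat.add_zero]
      split_ifs <;> simp_all <;> omega
    rw [hrange]
    simp only [gt_iff_lt, pvCommonF_eq_cntF cats i (by omega)]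
    split_ifs <;> push_cast <;> ring

theorem pvB_eq (cats : List String) (k : Int) (h : cats ≠ []) :
    commonStrings2_alt cats k = pvAnsF cats k := by
  simp only [commonStrings2_alt]
  have hlen : 1 ≤ cats.length := List.length_pos_of_ne_nil h
  have hL : ∀ y : String, (PySem.Dict.empty : PySem.Dict String Int).getD y 0
      = ((cats.take 0).count y : Int) := by
    intro y; simp [PySem.Dict.getD, PySem.Dict.get?, PySem.Dict.empty]
  have hR : ∀ y : String, (cats.foldl (fun d x => d.insert x (d.getD x 0 + 1)) PySem.Dict.empty).getD y 0
      = ((cats.drop 0).count y : Int) := by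
    intro y
    rw [PySem.Dict.getD_foldl_insert_add_one]
    simp [PySem.Dict.getD, PySem.Dict.get?, PySem.Dict.empty]
  have hc : (0 : Int) = (pvCommonF cats 0 : Int) := by
    unfold pvCommonF
    simp
  have hmain := pvLoopB cats k (cats.length - 1) 0 (by omega) PySem.Dict.empty
    (cats.foldl (fun d x => d.insert x (d.getD x 0 + 1)) PySem.Dict.empty) 0 0 hL hR hc
  rw [show ((0:Nat):Int) = (0:Int) from rfl] at hmain
  rw [hmain]
  unfold pvAnsF
  simp

-- ===== VERDICT =====
theorem commonStrings2_spec : Claim_equal_commonStrings2 := by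
  intro cats k _ hpre
  unfold Spec_commonStrings2
  rw [pvA_eq cats k hpre, pvB_eq cats k hpre]
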